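-- pv_equiv track=rewrite | github.com/jreeves3/CAV24-FromClausesToKlauses | Data/get_data.py | clean_benchmark_name
-- ===== SOURCE A (Python) =====
-- def clean_end (name, e):
--   if name.endswith(e):
--     name = name.replace(e, '')
--   return name
--
-- def clean_benchmark_name (name):
--   in_name = name
--   ends = ["-ccdcl","-cadical", "-ccdclPlus ", "-ccdclPlus", "-ccdclPlusModes ", "-ccdclPlusModes","-reencode","-sat4j", "-roundingSAT","-noDecide0","-noDecide1", "-ccdclPlusModesDelete"]
--   for e in ends:
--     name = clean_end (name, e)
--   if in_name != name:
--     return clean_benchmark_name (name)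
--   return name
-- ===== SOURCE B (Python) =====
-- def clean_benchmark_name(name):
--     ends = ["-ccdcl", "-cadical", "-ccdclPlus ", "-ccdclPlus", "-ccdclPlusModes ",
--             "-ccdclPlusModes", "-reencode", "-sat4j", "-roundingSAT", "-noDecide0",
--             "-noDecide1", "-ccdclPlusModesDelete"]
--     changed = True
--     while changed:
--         start = name
--         for e in ends:
--             if name.endswith(e):
--                 name = name.replace(e, '')
--         changed = (name != start)
--     return name
-- ===== Notes on version B (the rewrite author's own statement) =====
-- stated objective: simpler
-- what changed: Replaces the self-recursion with an explicit while-changed fixed-point loop and inlines the clean_end helper into a single iterative routine.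
import Mathlib
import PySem

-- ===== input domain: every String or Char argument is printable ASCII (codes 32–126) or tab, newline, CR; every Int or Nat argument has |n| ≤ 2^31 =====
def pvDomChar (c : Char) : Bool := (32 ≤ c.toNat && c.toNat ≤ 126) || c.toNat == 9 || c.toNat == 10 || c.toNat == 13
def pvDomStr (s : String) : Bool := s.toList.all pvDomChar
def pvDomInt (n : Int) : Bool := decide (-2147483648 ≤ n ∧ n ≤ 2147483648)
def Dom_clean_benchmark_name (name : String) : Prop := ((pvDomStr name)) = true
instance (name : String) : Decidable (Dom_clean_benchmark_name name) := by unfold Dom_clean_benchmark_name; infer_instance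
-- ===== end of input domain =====

-- B replaces A's self-recursion with an explicit while-changed fixed-point loop and inlines
-- the clean_end helper; same fixed point, no speed claim (objective: simpler).

-- ===== PORT A =====
-- the fixed suffix list of A
def pvEnds : List String :=
  ["-ccdcl", "-cadical", "-ccdclPlus ", "-ccdclPlus", "-ccdclPlusModes ",
   "-ccdclPlusModes", "-reencode", "-sat4j", "-roundingSAT", "-noDecide0",
   "-noDecide1", "-ccdclPlusModesDelete"]

-- clean_end of A
def pvCleanEnd (name e : String) : String :=
  if PySem.Str.endswith name e then PySem.Str.replace name e "" else name

-- A's recursion; the fuel argument only makes the recursion total: every recursive call is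
-- made with a strictly shorter string (a triggered replace removes a non-empty suffix), so
-- name.length + 1 units are never exhausted on the calls Python actually makes.
def pvCleanRecA : Nat → String → String
  | 0, name => name
  | fuel + 1, name =>
      let in_name := name
      let name1 := pvEnds.foldl pvCleanEnd name
      if in_name ≠ name1 then pvCleanRecA fuel name1 else name1

def clean_benchmark_name (name : String) : String :=
  pvCleanRecA (name.length + 1) name

-- ===== PORT B =====
-- B's inner 'for e in ends' pass, the conditional replace inlined
def pvPassB : List String → String → String
  | [], n => n
  | e :: es, n =>
      pvPassB es (if PySem.Str.endswith n e then PySem.Str.replace n e "" else n)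

-- B's 'while changed' loop; fuel is the totality guard only (see the note at pvCleanRecA)
def pvWhileB : Nat → String → String
  | 0, n => n
  | fuel + 1, n =>
      let m := pvPassB pvEnds n
      if m = n then n else pvWhileB fuel m

def clean_benchmark_name_alt (name : String) : String :=
  pvWhileB (name.length + 1) name

-- ===== PRECONDITION & SPEC =====
def Spec_clean_benchmark_name (name : String) (out : String) : Prop := out = clean_benchmark_name_alt name
instance (name : String) (out : String) : Decidable (Spec_clean_benchmark_name name out) := by unfold Spec_clean_benchmark_name; infer_instance

-- ===== CLAIM (what is proved, stated in full; the proofs are below) =====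
def Claim_equal_clean_benchmark_name : Prop := ∀ (name : String), Dom_clean_benchmark_name name → Spec_clean_benchmark_name name (clean_benchmark_name name)

-- ===== LEMMAS AND PROOFS =====

theorem pvPassB_eq_foldl (es : List String) (n : String) :
    pvPassB es n = es.foldl pvCleanEnd n := by
  induction es generalizing n with
  | nil => rfl
  | cons e es ih => simp [pvPassB, List.foldl, pvCleanEnd, ih]

theorem pvWhileB_eq_recA (fuel : Nat) (n : String) :
    pvCleanRecA fuel n = pvWhileB fuel n := by
  induction fuel generalizing n with
  | zero => rfl
  | succ f ih =>
      simp only [pvCleanRecA, pvWhileB, pvPassB_eq_foldl]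
      by_cases h : List.foldl pvCleanEnd n pvEnds = n
      · simp [h]
      · simp [h, Ne.symm h, ih]

-- ===== VERDICT (by name: the statement is the Claim_ definition above) =====
theorem clean_benchmark_name_spec : Claim_equal_clean_benchmark_name := by
  intro name _
  unfold Spec_clean_benchmark_name clean_benchmark_name clean_benchmark_name_alt
  exact pvWhileB_eq_recA _ _
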